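-- pv_equiv track=rewrite | github.com/maayanbrodsky/Karioos-and-Baktoos | upload_283.py | check_for_negatives
-- ===== SOURCE A (Python) =====
-- from math import inf
-- from typing import List
--
-- def check_for_negatives(row: List[int]) -> int:
--     """Main algorithm. Takes board line, checks for the largest negative integer
--     and returns it if no negatives exist, returns largest positive."""
--     optimal = -inf
--     negatives = 0
--     for num in row:
--         if optimal < num < 0:
--             optimal = num
--             negatives += 1
--     if negatives == 0:
--         return max(row)
--     else:
--         return optimal
-- ===== SOURCE B (Python) =====
-- from typing import List
--
-- def check_for_negatives(row: List[int]) -> int: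
--     negs = [n for n in row if n < 0]
--     if negs:
--         return max(negs)
--     return max(row)
-- ===== Notes on version B (the rewrite author's own statement) =====
-- stated objective: simpler
-- what changed: A's single fused pass with a running max-negative and an update counter used as a presence flag is replaced by a filter-then-aggregate decomposition: collect the negatives once, then take max of that list or of the whole row.
import Mathlib
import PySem

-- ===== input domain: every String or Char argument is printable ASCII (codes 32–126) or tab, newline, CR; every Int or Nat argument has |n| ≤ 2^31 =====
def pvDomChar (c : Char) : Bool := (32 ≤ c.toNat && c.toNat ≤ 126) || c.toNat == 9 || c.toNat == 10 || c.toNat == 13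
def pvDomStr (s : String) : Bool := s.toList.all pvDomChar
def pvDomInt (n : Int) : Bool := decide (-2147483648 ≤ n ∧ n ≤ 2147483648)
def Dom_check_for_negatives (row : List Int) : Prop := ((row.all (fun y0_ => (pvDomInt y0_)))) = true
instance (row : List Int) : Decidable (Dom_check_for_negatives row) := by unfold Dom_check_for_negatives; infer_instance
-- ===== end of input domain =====

-- B replaces A's fused pass (running max-negative + update counter as presence flag)
-- with a filter-then-aggregate decomposition (objective: simpler). Same O(n) cost.


-- ===== PORT A =====
-- the for-loop over row, carrying (optimal, negatives); optimal = none stands for -inf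
def cfnLoop : List Int → Option Int → Int → Option Int × Int
  | [], optimal, negatives => (optimal, negatives)
  | num :: rest, optimal, negatives =>
    match optimal with
    | none =>        -- -inf < num always holds
      if num < 0 then cfnLoop rest (some num) (negatives + 1)
      else cfnLoop rest none negatives
    | some ov =>
      if ov < num ∧ num < 0 then cfnLoop rest (some num) (negatives + 1)
      else cfnLoop rest (some ov) negatives

def check_for_negatives (row : List Int) : Int :=
  let st := cfnLoop row none 0
  if st.2 = 0 then (PySem.List.max? row (fun y => y)).getD 0   -- none (empty row) excluded by Pre_
  else st.1.getD 0                                             -- none unreachable when st.2 ≠ 0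

-- ===== PORT B =====
def check_for_negatives_alt (row : List Int) : Int :=
  let negs := row.filter (fun n => n < 0)
  if negs ≠ [] then (PySem.List.max? negs (fun y => y)).getD 0
  else (PySem.List.max? row (fun y => y)).getD 0               -- none (empty row) excluded by Pre_

-- ===== PRECONDITION & SPEC =====
-- Pre_ excludes only the empty row, on which both A and B raise ValueError (max of empty sequence)
def Pre_check_for_negatives (row : List Int) : Prop := row ≠ []
instance (row : List Int) : Decidable (Pre_check_for_negatives row) := by unfold Pre_check_for_negatives; infer_instance
def pvWitness_check_for_negatives : List Int := [3, -7, -2, 5]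

def Spec_check_for_negatives (row : List Int) (out : Int) : Prop := out = check_for_negatives_alt row
instance (row : List Int) (out : Int) : Decidable (Spec_check_for_negatives row out) := by unfold Spec_check_for_negatives; infer_instance

-- ===== CLAIM (what is proved, stated in full; the proofs are below) =====
def Claim_equal_check_for_negatives : Prop := ∀ (row : List Int), Dom_check_for_negatives row → Pre_check_for_negatives row → Spec_check_for_negatives row (check_for_negatives row)

-- ===== LEMMAS AND PROOFS =====

-- once optimal holds a value, it stays the running max over the negatives seen
theorem cfnLoop_val (row : List Int) : ∀ (ov c : Int),
    (cfnLoop row (some ov) c).1 = some ((row.filter (fun n => n < 0)).foldl max ov) := by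
  induction row with
  | nil => intro ov c; simp [cfnLoop]
  | cons num rest ih =>
    intro ov c
    by_cases h : ov < num ∧ num < 0
    · simp [cfnLoop, h, ih, max_eq_right (le_of_lt h.1)]
    · by_cases hn : num < 0
      · have hle : num ≤ ov := le_of_not_gt (fun hc => h ⟨hc, hn⟩)
        simp [cfnLoop, hn, not_lt.mpr hle, ih, max_eq_left hle]
      · simp [cfnLoop, hn, ih]

-- the counter never returns to zero once positive
theorem cfnLoop_count_pos (row : List Int) : ∀ (o : Option Int) (c : Int), c ≠ 0 → 0 ≤ c →
    (cfnLoop row o c).2 ≠ 0 := by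
  induction row with
  | nil => intro o c hc _; simpa [cfnLoop] using hc
  | cons num rest ih =>
    intro o c hc hc0
    match o with
    | none =>
      by_cases hn : num < 0
      · simp only [cfnLoop, hn, if_true]; exact ih _ _ (by omega) (by omega)
      · simp only [cfnLoop, hn, if_false]; exact ih _ _ hc hc0
    | some ov =>
      by_cases h : ov < num ∧ num < 0
      · simp only [cfnLoop, h]; exact ih _ _ (by omega) (by omega)
      · simp only [cfnLoop, h, if_false]; exact ih _ _ hc hc0

-- with no negatives, the loop never fires
theorem cfnLoop_none_no_neg (row : List Int) (h : row.filter (fun n => n < 0) = []) :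
    cfnLoop row none 0 = (none, 0) := by
  induction row with
  | nil => simp [cfnLoop]
  | cons num rest ih =>
    by_cases hn : num < 0
    · simp [hn] at h
    · simp only [cfnLoop, hn, if_false]
      exact ih (by simpa [List.filter_cons, hn] using h)

-- with a negative present, the loop ends with optimal = max of the negatives and a nonzero counter
theorem cfnLoop_first_neg (row : List Int) : ∀ (m : Int) (ms : List Int),
    row.filter (fun n => n < 0) = m :: ms →
    (cfnLoop row none 0).1 = some (ms.foldl max m) ∧ (cfnLoop row none 0).2 ≠ 0 := by
  induction row with
  | nil => intro m ms h; simp at h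
  | cons num rest ih =>
    intro m ms h
    by_cases hn : num < 0
    · simp only [List.filter_cons, hn, decide_true, if_true] at h
      injection h with h1 h2
      subst h1
      refine ⟨?_, ?_⟩
      · simp only [cfnLoop, hn, if_true]
        rw [cfnLoop_val rest num (0+1), h2]
      · simp only [cfnLoop, hn, if_true]
        exact cfnLoop_count_pos rest (some num) (0+1) (by omega) (by omega)
    · simp only [cfnLoop, hn, if_false]
      exact ih m ms (by simpa [List.filter_cons, hn] using h)

theorem check_for_negatives_spec : Claim_equal_check_for_negatives := by
  intro row _ hpre
  unfold Spec_check_for_negatives check_for_negatives check_for_negatives_alt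
  by_cases hneg : row.filter (fun n => n < 0) = []
  · simp [cfnLoop_none_no_neg row hneg, hneg]
  · rcases List.exists_cons_of_ne_nil hneg with ⟨m, ms, hm⟩
    obtain ⟨hv, hc⟩ := cfnLoop_first_neg row m ms hm
    simp [hv, hc, hm, PySem.List.max?_id_cons]
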